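-- pv_equiv track=rewrite | github.com/pranavanil47/Csc-110-project | gradescopeprojects/infograph.py | capitalized_count
-- ===== SOURCE A (Python) =====
-- def capitalized_count(word_count):
--     '''
--     This function reads the dictionary and checks if the word is captilized or not,
--     and does a count of both captilized and non captilized  words.
--     Parameters;
--     word_count: This can be any dictionary with the format {string:integer}.
--     '''
--     cap = 0
--     no_cap = 0
--     for key in word_count:                     ## looping to check if each key is captilized or not.
--         if key[0].isupper() == True:
--             cap+=1
--         else:
--             no_cap+=1
--     return cap, no_cap
-- ===== SOURCE B (Python) =====
-- def capitalized_count(word_count):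
--     # Group the (distinct) keys by their FIRST CHARACTER into a frequency map,
--     # then aggregate: cap = total multiplicity of uppercase first characters,
--     # no_cap = total of all buckets minus cap.
--     freq = {}
--     for key in word_count:
--         c = key[0]
--         freq[c] = freq.get(c, 0) + 1
--     cap = sum(n for c, n in freq.items() if c.isupper())
--     return cap, sum(freq.values()) - cap
-- ===== Notes on version B (the rewrite author's own statement) =====
-- stated objective: alternative
-- what changed: Instead of classifying each key in one if/else loop, B first builds a frequency map from first character to how many keys start with it, then aggregates that map: cap is the sum of the buckets whose character is uppercase and no_cap is the total of all buckets minus cap.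
import Mathlib
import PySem

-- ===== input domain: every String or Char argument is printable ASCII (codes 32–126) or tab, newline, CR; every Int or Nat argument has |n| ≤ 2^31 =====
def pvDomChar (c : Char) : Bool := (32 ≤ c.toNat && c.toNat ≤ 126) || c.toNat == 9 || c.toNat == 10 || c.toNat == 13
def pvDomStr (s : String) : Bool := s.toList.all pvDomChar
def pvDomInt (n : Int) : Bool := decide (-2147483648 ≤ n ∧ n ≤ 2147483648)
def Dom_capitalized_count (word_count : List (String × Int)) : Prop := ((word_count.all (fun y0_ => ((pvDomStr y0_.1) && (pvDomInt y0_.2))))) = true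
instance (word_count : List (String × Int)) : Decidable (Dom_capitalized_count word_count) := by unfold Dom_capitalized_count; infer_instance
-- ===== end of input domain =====

-- B replaces A's single if/else classification loop by a two-stage grouping algorithm:
-- it first builds a frequency map from each key's FIRST CHARACTER to the number of keys
-- starting with it, then aggregates that map (cap = buckets with an uppercase character,
-- no_cap = total of all buckets minus cap); objective: alternative (same cost).

-- ===== PORT A =====
-- 'for key in word_count' iterates the dict's keys: first occurrences, in order (PySem.Set.ofList).
-- 'key[0]' on an empty key is an IndexError (pyGet? = none); that input is excluded by Pre_ below,
-- the none branch leaves the state unchanged (unreachable under Pre_).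
def capitalized_count (word_count : List (String × Int)) : Int × Int :=
  let step : Int × Int → String → Int × Int := fun s key =>
    match PySem.Str.pyGet? key 0 with
    | some c => if PySem.Chars.isupper c then (s.1 + 1, s.2) else (s.1, s.2 + 1)
    | none => s
  (PySem.Set.ofList (word_count.map Prod.fst)).foldl step ((0 : Int), (0 : Int))

-- ===== PORT B =====
-- 'freq[c] = freq.get(c, 0) + 1' over the dict's keys; key[0] is pyGet? (none = IndexError,
-- outside Pre_), so the frequency map is keyed by Option Char.
def capitalized_count_alt (word_count : List (String × Int)) : Int × Int :=
  let freq : PySem.Dict (Option Char) Int :=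
    (PySem.Set.ofList (word_count.map Prod.fst)).foldl
      (fun d key =>
        let c := PySem.Str.pyGet? key 0
        d.insert c (d.getD c 0 + 1)) PySem.Dict.empty
  let cap : Int := ((freq.items.filter (fun p => p.1.any PySem.Chars.isupper)).map Prod.snd).sum
  (cap, freq.values.sum - cap)

-- ===== PRECONDITION & SPEC =====
-- Pre_ excludes dicts with an empty-string key, on which A (and the Python B) raise IndexError.
def Pre_capitalized_count (word_count : List (String × Int)) : Prop :=
  ∀ p ∈ word_count, p.1 ≠ ""
instance (word_count : List (String × Int)) : Decidable (Pre_capitalized_count word_count) := by unfold Pre_capitalized_count; infer_instance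
def pvWitness_capitalized_count : (List (String × Int)) := [("Ab", 1), ("cd", 2)]

def Spec_capitalized_count (word_count : List (String × Int)) (out : Int × Int) : Prop := out = capitalized_count_alt word_count
instance (word_count : List (String × Int)) (out : Int × Int) : Decidable (Spec_capitalized_count word_count out) := by unfold Spec_capitalized_count; infer_instance

-- ===== CLAIM (what is proved, stated in full; the proofs are below) =====
def Claim_equal_capitalized_count : Prop := ∀ (word_count : List (String × Int)), Dom_capitalized_count word_count → Pre_capitalized_count word_count → Spec_capitalized_count word_count (capitalized_count word_count)

-- ===== LEMMAS AND PROOFS =====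

-- A's loop, characterised: over keys with a first character it returns
-- (number satisfying the uppercase test, number failing it).
lemma pvFoldl_count (l : List String) (h : ∀ k ∈ l, k ≠ "") (a b : Int) :
    l.foldl (fun (s : Int × Int) key =>
      match PySem.Str.pyGet? key 0 with
      | some c => if PySem.Chars.isupper c then (s.1 + 1, s.2) else (s.1, s.2 + 1)
      | none => s) (a, b)
    = (a + (l.countP (fun k => (PySem.Str.pyGet? k 0).any PySem.Chars.isupper) : Nat), b + ((l.length : Int) - (l.countP (fun k => (PySem.Str.pyGet? k 0).any PySem.Chars.isupper) : Nat))) := by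
  induction l generalizing a b with
  | nil => simp
  | cons k l ih =>
    have hk : k ≠ "" := h k (List.mem_cons_self ..)
    have hne : k.toList ≠ [] := by
      intro hc; exact hk (by simpa using congrArg String.ofList hc)
    obtain ⟨c, cs, hcs⟩ := List.exists_cons_of_ne_nil hne
    have hget : PySem.Str.pyGet? k 0 = some c := by
      simp [PySem.Str.pyGet?, PySem.List.pyGet?, PySem.List.pyIdx?, hcs]
    have htail := fun k hk => h k (List.mem_cons_of_mem _ hk)
    by_cases hu : PySem.Chars.isupper c
    · simp only [List.foldl_cons, hget, hu, if_true, ih htail, List.countP_cons,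
        Option.any_some, List.length_cons]
      rw [Prod.mk.injEq]; constructor <;> push_cast <;> ring
    · simp only [List.foldl_cons, hget, hu, if_false, ih htail, List.countP_cons,
        Option.any_some, List.length_cons, Bool.false_eq_true]
      rw [Prod.mk.injEq]; constructor <;> push_cast [hu] <;> ring

-- ofList gives the same distinct elements as Mathlib's dedup (order may differ; sums don't care).
lemma pvOfList_perm_dedup {α : Type} [BEq α] [LawfulBEq α] [DecidableEq α] (l : List α) :
    (PySem.Set.ofList l).Perm l.dedup :=
  (List.perm_ext_iff_of_nodup (PySem.Set.nodup_ofList l) l.nodup_dedup).mpr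
    (by simp [PySem.Set.mem_ofList, List.mem_dedup])

-- The port's List.count uses Option Char's derived BEq; Mathlib's dedup lemmas use the
-- DecidableEq-induced one. Both are lawful, so the counts coincide.
lemma pvCount_eq {α : Type} [BEq α] [LawfulBEq α] [DecidableEq α] (a : α) (l : List α) :
    l.count a = @List.count α instBEqOfDecidableEq a l := by
  simp only [List.count_eq_countP]
  apply List.countP_congr
  intro x _
  simp

-- Summing the counter's uppercase buckets = counting the uppercase elements.
lemma pvSum_filter_counts (l : List (Option Char)) (p : Option Char → Bool) :
    ((((PySem.Set.ofList l).filter p).map (fun k => ((l.count k : Nat) : Int))).sum)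
      = (l.countP p : Int) := by
  have hperm := ((pvOfList_perm_dedup l).filter p).map (fun k => ((l.count k : Nat) : Int))
  rw [hperm.sum_eq,
    show (fun k => ((l.count k : Nat) : Int)) = fun k => ((@List.count _ instBEqOfDecidableEq k l : Nat) : Int)
      from funext fun k => by rw [pvCount_eq],
    ← List.sum_map_count_dedup_filter_eq_countP p l, Nat.cast_list_sum, List.map_map]
  rfl

-- Summing all the counter's buckets = the number of elements.
lemma pvSum_counts (l : List (Option Char)) :
    (((PySem.Set.ofList l).map (fun k => ((l.count k : Nat) : Int))).sum) = (l.length : Int) := by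
  have hperm := (pvOfList_perm_dedup l).map (fun k => ((l.count k : Nat) : Int))
  rw [hperm.sum_eq,
    show (fun k => ((l.count k : Nat) : Int)) = fun k => ((@List.count _ instBEqOfDecidableEq k l : Nat) : Int)
      from funext fun k => by rw [pvCount_eq],
    ← List.sum_map_count_dedup_eq_length (l := l), Nat.cast_list_sum, List.map_map]
  rfl

-- ===== VERDICT (by name: the statement is the Claim_ definition above) =====
theorem capitalized_count_spec : Claim_equal_capitalized_count := by
  intro wc _ hpre
  unfold Spec_capitalized_count capitalized_count capitalized_count_alt
  simp only []
  set keys := PySem.Set.ofList (wc.map Prod.fst) with hkeysdef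
  have hkeys : ∀ k ∈ keys, k ≠ "" := by
    intro k hk
    have : k ∈ wc.map Prod.fst := (PySem.Set.mem_ofList ..).mp hk
    obtain ⟨p, hp, rfl⟩ := List.mem_map.mp this
    exact hpre p hp
  -- B's frequency map is the counter of the first characters
  have hfold : keys.foldl
      (fun (d : PySem.Dict (Option Char) Int) key =>
        let c := PySem.Str.pyGet? key 0
        d.insert c (d.getD c 0 + 1)) PySem.Dict.empty
      = PySem.Dict.counter (keys.map (fun k => PySem.Str.pyGet? k 0)) := by
    rw [← PySem.Dict.foldl_insert_getD_add_one_eq_counter, List.foldl_map]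
  rw [pvFoldl_count keys hkeys 0 0, hfold]
  set firsts := keys.map (fun k => PySem.Str.pyGet? k 0) with hfirstsdef
  have hitems : (PySem.Dict.counter firsts).items
      = (PySem.Set.ofList firsts).map (fun k => (k, ((firsts.count k : Nat) : Int))) :=
    PySem.Dict.items_counter firsts
  have hvalues : (PySem.Dict.counter firsts).values
      = (PySem.Dict.counter firsts).items.map Prod.snd := by
    simp [PySem.Dict.values]
  set p : Option Char → Bool := fun c? => c?.any PySem.Chars.isupper with hpdef
  have hcap : (((PySem.Dict.counter firsts).items.filter
        (fun q => q.1.any PySem.Chars.isupper)).map Prod.snd).sum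
      = (firsts.countP p : Int) := by
    rw [hitems, List.filter_map, List.map_map]
    exact pvSum_filter_counts firsts p
  have htot : (PySem.Dict.counter firsts).values.sum = (firsts.length : Int) := by
    rw [hvalues, hitems, List.map_map]
    exact pvSum_counts firsts
  have hcount : firsts.countP p = keys.countP (fun k => (PySem.Str.pyGet? k 0).any PySem.Chars.isupper) := by
    rw [hfirstsdef, List.countP_map]; rfl
  have hlen : firsts.length = keys.length := by simp [hfirstsdef]
  rw [hcap, htot, hcount, hlen]
  rw [Prod.mk.injEq]; constructor <;> ring
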